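-- pv_equiv track=rewrite | github.com/tomekrzymyszkiewicz/advent-of-code-2023 | day11/task1.py | count_paths_to_other_nodes
-- ===== SOURCE A (Python) =====
-- def count_paths_to_other_nodes(
--     galaxy_map: list[list[str]], node_i: int, node_j: int
-- ) -> int:
--     paths_length = 0
--     for i in range(node_i, len(galaxy_map)):
--         for j in range(len(galaxy_map[0])):
--             if galaxy_map[i][j] == "#" and not (node_i == i and node_j == j):
--                 paths_length += abs(i - node_i) + abs(j - node_j)
--     return paths_length, galaxy_map
-- ===== SOURCE B (Python) =====
-- def count_paths_to_other_nodes(galaxy_map, node_i, node_j):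
--     # Separable decomposition: row-distance and column-distance parts summed
--     # independently; the self cell contributes 0, so no exclusion is needed.
--     width = len(galaxy_map[0]) if galaxy_map else 0
--     rows = galaxy_map[node_i:]
--     total = 0
--     for dist in range(len(rows)):
--         total += dist * sum(1 for j in range(width) if rows[dist][j] == "#")
--     for j in range(width):
--         total += abs(j - node_j) * sum(1 for row in rows if row[j] == "#")
--     return total, galaxy_map
-- ===== Notes on version B (the rewrite author's own statement) =====
-- stated objective: alternative
-- what changed: Replaces A's per-cell Manhattan accumulation over a nested index loop (with an explicit self-exclusion test) by a separable decomposition: slice off the rows below node_i, sum the row-distance contributions per row and the column-distance contributions per column in two independent passes, dropping the self-exclusion since that cell contributes 0.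
-- outside the precondition, e.g. on count_paths_to_other_nodes([['#']], -1, 0): A returns (1, [['#']]), B returns (0, [['#']])
import Mathlib
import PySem

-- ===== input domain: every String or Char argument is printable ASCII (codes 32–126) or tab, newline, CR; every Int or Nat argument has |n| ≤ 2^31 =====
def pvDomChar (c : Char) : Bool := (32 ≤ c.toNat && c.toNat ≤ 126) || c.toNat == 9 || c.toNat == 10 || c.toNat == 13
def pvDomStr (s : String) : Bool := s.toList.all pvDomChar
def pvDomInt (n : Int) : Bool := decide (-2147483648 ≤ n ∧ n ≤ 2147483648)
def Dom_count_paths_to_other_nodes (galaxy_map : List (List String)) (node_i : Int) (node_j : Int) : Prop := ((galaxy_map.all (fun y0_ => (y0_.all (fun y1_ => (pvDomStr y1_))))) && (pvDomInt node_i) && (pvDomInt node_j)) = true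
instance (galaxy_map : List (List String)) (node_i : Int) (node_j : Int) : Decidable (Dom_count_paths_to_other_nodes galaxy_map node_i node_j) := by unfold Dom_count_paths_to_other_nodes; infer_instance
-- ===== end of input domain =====

-- B replaces A's per-cell nested Manhattan accumulation by a separable decomposition
-- (row-distance pass + column-distance pass over the sliced-off lower rows); same cost class.


-- ===== PORT A =====
-- literal transliteration: nested index loops, per-cell |i-node_i|+|j-node_j| with self-exclusion
def count_paths_to_other_nodes (galaxy_map : List (List String)) (node_i : Int) (node_j : Int) : Int × List (List String) :=
  let paths_length : Int :=
    (PySem.List.pyRange node_i (galaxy_map.length : Int) 1).foldl (fun acc i =>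
      (PySem.List.pyRange 0 ((PySem.List.pyGetD galaxy_map (0:Int) []).length : Int) 1).foldl (fun acc2 j =>
        if PySem.List.pyGetD (PySem.List.pyGetD galaxy_map i []) j "" = "#" ∧ ¬ (node_i = i ∧ node_j = j)
        then acc2 + |i - node_i| + |j - node_j| else acc2) acc) 0
  (paths_length, galaxy_map)

-- ===== PORT B =====
-- literal transliteration of Source B: slice the rows from node_i on, then two independent passes:
-- row-distance part (dist * row hit count) and column-distance part (|j-node_j| * column hit count)
def count_paths_to_other_nodes_alt (galaxy_map : List (List String)) (node_i : Int) (node_j : Int) : Int × List (List String) :=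
  let width : Nat := (galaxy_map.headD []).length
  let rows := PySem.List.slice galaxy_map (some node_i) none
  let total1 : Int :=
    (List.range rows.length).foldl (fun (acc : Int) (dist : Nat) =>
      acc + (dist : Int) * ((List.range width).foldl (fun (c : Int) (j : Nat) =>
        if PySem.List.pyGetD (rows.getD dist []) (j : Int) "" = "#" then c + 1 else c) 0)) 0
  let total2 : Int :=
    (List.range width).foldl (fun (acc : Int) (j : Nat) =>
      acc + |(j : Int) - node_j| * (rows.foldl (fun (c : Int) (row : List String) =>
        if PySem.List.pyGetD row (j : Int) "" = "#" then c + 1 else c) 0)) 0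
  (total1 + total2, galaxy_map)

-- ===== PRECONDITION & SPEC =====
-- Pre_ excludes node_i < 0, where A silently wraps negative row indices (an accidental value B does
-- not reproduce), and ragged maps whose rows below node_i are shorter than row 0 (A raises IndexError).
def Pre_count_paths_to_other_nodes (galaxy_map : List (List String)) (node_i : Int) (node_j : Int) : Prop :=
  0 ≤ node_i ∧ ∀ row ∈ galaxy_map.drop node_i.toNat, (galaxy_map.headD []).length ≤ row.length
instance (galaxy_map : List (List String)) (node_i : Int) (node_j : Int) : Decidable (Pre_count_paths_to_other_nodes galaxy_map node_i node_j) := by unfold Pre_count_paths_to_other_nodes; infer_instance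

def pvWitness_count_paths_to_other_nodes : List (List String) × Int × Int :=
  ([["#", "."], [".", "#"]], 0, 0)

def Spec_count_paths_to_other_nodes (galaxy_map : List (List String)) (node_i : Int) (node_j : Int) (out : Int × List (List String)) : Prop := out = count_paths_to_other_nodes_alt galaxy_map node_i node_j
instance (galaxy_map : List (List String)) (node_i : Int) (node_j : Int) (out : Int × List (List String)) : Decidable (Spec_count_paths_to_other_nodes galaxy_map node_i node_j out) := by unfold Spec_count_paths_to_other_nodes; infer_instance

-- ===== CLAIM (what is proved, stated in full; the proofs are below) =====
def Claim_equal_count_paths_to_other_nodes : Prop := ∀ (galaxy_map : List (List String)) (node_i : Int) (node_j : Int), Dom_count_paths_to_other_nodes galaxy_map node_i node_j → Pre_count_paths_to_other_nodes galaxy_map node_i node_j → Spec_count_paths_to_other_nodes galaxy_map node_i node_j (count_paths_to_other_nodes galaxy_map node_i node_j)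

-- ===== LEMMAS AND PROOFS =====

-- per-row hit indicator on column j (both programs test the same cell the same way)
def pvHit (row : List String) (j : Nat) : Int :=
  if row.getD j "" = "#" then 1 else 0

theorem pv_sum_mul_left (c : Int) (l : List Int) : (l.map (fun x => c * x)).sum = c * l.sum := by
  induction l with
  | nil => simp
  | cons a t ih => simp [ih, mul_add]

-- swap a list sum with a Finset.range sum
theorem pv_swap (R : List (List String)) (w : Nat) (g : Nat → List String → Int) :
    (R.map (fun r => ∑ j ∈ Finset.range w, g j r)).sum
      = ∑ j ∈ Finset.range w, (R.map (g j)).sum := by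
  induction R with
  | nil => simp
  | cons r t ih => simp [ih, Finset.sum_add_distrib]

theorem pv_listrange_sum (n : Nat) (f : Nat → Int) :
    ((List.range n).map f).sum = ∑ j ∈ Finset.range n, f j := rfl

theorem pv_foldl_ite_add {α : Type} (l : List α) (p : α → Prop) [DecidablePred p] (g : α → Int) (a : Int) :
    l.foldl (fun acc x => if p x then acc + g x else acc) a
      = a + (l.map (fun x => if p x then g x else 0)).sum := by
  rw [show (fun acc x => if p x then acc + g x else acc)
        = fun (acc : Int) x => acc + (if p x then g x else 0) by
      funext acc x; split_ifs <;> simp]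
  exact PySem.List.foldl_add _ _ _

theorem pv_map_sum_getD (R : List (List String)) (f : List String → Int) :
    (R.map f).sum = ∑ k ∈ Finset.range R.length, f (R.getD k []) := by
  induction R with
  | nil => simp
  | cons r t ih =>
      simp only [List.map_cons, List.sum_cons, ih, List.length_cons]
      rw [Finset.sum_range_succ']
      simp [add_comm]

-- the separability identity at the heart of the claim
theorem pv_core (w : Nat) (nj : Int) (R : List (List String)) :
    (∑ k ∈ Finset.range R.length, ∑ j ∈ Finset.range w,
        pvHit (R.getD k []) j * ((k : Int) + |(j : Int) - nj|))
      = (∑ k ∈ Finset.range R.length,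
            (k : Int) * ∑ j ∈ Finset.range w, pvHit (R.getD k []) j)
        + (R.map (fun row => ∑ j ∈ Finset.range w, |(j : Int) - nj| * pvHit row j)).sum := by
  rw [pv_map_sum_getD, ← Finset.sum_add_distrib]
  refine Finset.sum_congr rfl (fun k _ => ?_)
  rw [Finset.mul_sum, ← Finset.sum_add_distrib]
  refine Finset.sum_congr rfl (fun j _ => ?_)
  ring

-- ===== VERDICT (by name: the statement is the Claim_ definition above) =====
-- evaluation of port A to the double Finset sum (rows dropped, abs and self-exclusion resolved)
theorem pv_A_eval (gm : List (List String)) (t : Nat) (nj : Int) :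
    (count_paths_to_other_nodes gm (t : Int) nj).1
      = ∑ k ∈ Finset.range (gm.drop t).length, ∑ j ∈ Finset.range (gm.headD []).length,
          pvHit ((gm.drop t).getD k []) j * ((k : Int) + |(j : Int) - nj|) := by
  simp only [count_paths_to_other_nodes]
  have hw : PySem.List.pyGetD gm (0:Int) [] = gm.headD [] := by
    cases gm <;> simp [PySem.List.pyGetD_zero]
  rw [hw]
  simp only [PySem.List.pyRange_one, List.foldl_map]
  have hfun : (fun (acc : Int) (k : Nat) =>
      ((List.range ((((gm.headD []).length : Int) - 0).toNat)).foldl (fun acc2 (j : Nat) =>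
        if PySem.List.pyGetD (PySem.List.pyGetD gm ((t:Int) + (k:Int)) []) (0 + (j:Int)) "" = "#"
            ∧ ¬ ((t:Int) = (t:Int) + (k:Int) ∧ nj = 0 + (j:Int))
        then acc2 + |(t:Int) + (k:Int) - (t:Int)| + |0 + (j:Int) - nj| else acc2) acc))
      = fun (acc : Int) (k : Nat) =>
        acc + ∑ j ∈ Finset.range (gm.headD []).length, pvHit ((gm.drop t).getD k []) j * ((k : Int) + |(j : Int) - nj|) := by
    funext acc k
    have hd : (gm.drop t).getD k [] = gm.getD (t + k) [] := by
      simp [List.getD_eq_getElem?_getD, List.getElem?_drop]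
    have habs : |((t+k : Nat) : Int) - ((t : Nat) : Int)| = ((k : Nat) : Int) := by
      push_cast; simp
    simp only [zero_add, sub_zero, Int.toNat_natCast, ← Nat.cast_add,
      PySem.List.pyGetD_natCast, habs, add_assoc]
    rw [pv_foldl_ite_add (List.range (gm.headD []).length)
      (fun j : Nat => (gm.getD (t+k) []).getD j "" = "#" ∧ ¬ (((t:Nat):Int) = ((t+k:Nat):Int) ∧ nj = (j:Int)))
      (fun j : Nat => ((k:Nat):Int) + |(j:Int) - nj|)]
    congr 1
    rw [pv_listrange_sum]
    refine Finset.sum_congr rfl (fun j _ => ?_)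
    rw [hd]
    simp only [pvHit, List.getD_eq_getElem?_getD]
    split_ifs with h1 h2 h3
    · ring
    · exact absurd h1.1 h2
    · have hs : (↑t : Int) = ↑(t + k) ∧ nj = ↑j := by tauto
      have k0 : k = 0 := by have := hs.1; omega
      simp [k0, hs.2]
    · ring
  rw [hfun]
  rw [PySem.List.foldl_add]
  have hm : (((gm.length:Int)) - (t:Int)).toNat = (gm.drop t).length := by
    rw [List.length_drop]; omega
  rw [zero_add, hm, pv_listrange_sum]

-- evaluation of port B to the two separable sums
theorem pv_B_eval (gm : List (List String)) (t : Nat) (ni nj : Int) (hni : ni = (t : Int)) :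
    (count_paths_to_other_nodes_alt gm ni nj).1
      = (∑ k ∈ Finset.range (gm.drop t).length,
            (k : Int) * ∑ j ∈ Finset.range (gm.headD []).length, pvHit ((gm.drop t).getD k []) j)
        + ((gm.drop t).map (fun row =>
            ∑ j ∈ Finset.range (gm.headD []).length, |(j : Int) - nj| * pvHit row j)).sum := by
  subst hni
  simp only [count_paths_to_other_nodes_alt]
  rw [PySem.List.slice_from_natCast]
  congr 1
  · -- total1
    have hin : ∀ (dist : Nat), ((List.range (gm.headD []).length).foldl (fun (c : Int) (j : Nat) =>
        if PySem.List.pyGetD ((gm.drop t).getD dist []) (j : Int) "" = "#" then c + 1 else c) (0:Int))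
        = ∑ j ∈ Finset.range (gm.headD []).length, pvHit ((gm.drop t).getD dist []) j := by
      intro dist
      rw [pv_foldl_ite_add (List.range (gm.headD []).length) (fun j : Nat => PySem.List.pyGetD ((gm.drop t).getD dist []) (j:Int) "" = "#") (fun _ => (1:Int))]
      simp [pv_listrange_sum, pvHit]
    simp only [hin]
    rw [PySem.List.foldl_add]
    simp [pv_listrange_sum]
  · -- total2
    have hrows : ∀ (j : Nat), ((gm.drop t).foldl (fun (c : Int) (row : List String) =>
        if PySem.List.pyGetD row (j : Int) "" = "#" then c + 1 else c) (0:Int))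
        = ((gm.drop t).map (fun row => pvHit row j)).sum := by
      intro j
      rw [pv_foldl_ite_add (gm.drop t) (fun row : List String => PySem.List.pyGetD row (j:Int) "" = "#") (fun _ => (1:Int))]
      simp [pvHit]
    simp only [hrows]
    rw [PySem.List.foldl_add]
    simp only [pv_listrange_sum, zero_add]
    rw [pv_swap (g := fun j row => |(j:Int) - nj| * pvHit row j)]
    refine Finset.sum_congr rfl (fun j _ => ?_)
    rw [← pv_sum_mul_left, List.map_map]
    simp [Function.comp_def]


-- ===== VERDICT (by name: the statement is the Claim_ definition above) =====
theorem count_paths_to_other_nodes_spec : Claim_equal_count_paths_to_other_nodes := by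
  intro gm ni nj _ hpre
  obtain ⟨hni, -⟩ := hpre
  unfold Spec_count_paths_to_other_nodes
  obtain ⟨t, rfl⟩ : ∃ t : Nat, ni = (t : Int) := ⟨ni.toNat, (Int.toNat_of_nonneg hni).symm⟩
  have h1 : (count_paths_to_other_nodes gm (t : Int) nj).1
      = (count_paths_to_other_nodes_alt gm (t : Int) nj).1 := by
    rw [pv_A_eval gm t nj, pv_B_eval gm t (t : Int) nj rfl, pv_core]
  have h2 : (count_paths_to_other_nodes gm (t : Int) nj).2
      = (count_paths_to_other_nodes_alt gm (t : Int) nj).2 := rfl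
  exact Prod.ext h1 h2
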